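-- pv_equiv track=rewrite | github.com/christianebacani/Roadmap | Coding Challenges using Python and SQL/CodeForces Pyton Solved Problems/A Category/1955A_yogurt_sale.py | total_spent_when_using_promotion_price
-- ===== SOURCE A (Python) =====
-- def total_spent_when_using_promotion_price(total_yogurts: int, regular_price: int, promotion_price: int) -> int:
--     total_spent = 0
--
--     while total_yogurts > 0:
--         if total_yogurts >= 2:
--             total_spent += promotion_price
--             total_yogurts -= 2
--
--         else:
--             total_spent += regular_price
--             total_yogurts -= 1
--
--     return total_spent
-- ===== SOURCE B (Python) =====
-- def total_spent_when_using_promotion_price(total_yogurts: int, regular_price: int, promotion_price: int) -> int: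
--     n = max(total_yogurts, 0)
--     return (n // 2) * promotion_price + (n % 2) * regular_price
-- ===== Notes on version B (the rewrite author's own statement) =====
-- stated objective: faster
-- what changed: Replaced the pay-per-iteration while loop with the closed form (n//2)*promotion_price + (n%2)*regular_price (clamped at 0).
import Mathlib
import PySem

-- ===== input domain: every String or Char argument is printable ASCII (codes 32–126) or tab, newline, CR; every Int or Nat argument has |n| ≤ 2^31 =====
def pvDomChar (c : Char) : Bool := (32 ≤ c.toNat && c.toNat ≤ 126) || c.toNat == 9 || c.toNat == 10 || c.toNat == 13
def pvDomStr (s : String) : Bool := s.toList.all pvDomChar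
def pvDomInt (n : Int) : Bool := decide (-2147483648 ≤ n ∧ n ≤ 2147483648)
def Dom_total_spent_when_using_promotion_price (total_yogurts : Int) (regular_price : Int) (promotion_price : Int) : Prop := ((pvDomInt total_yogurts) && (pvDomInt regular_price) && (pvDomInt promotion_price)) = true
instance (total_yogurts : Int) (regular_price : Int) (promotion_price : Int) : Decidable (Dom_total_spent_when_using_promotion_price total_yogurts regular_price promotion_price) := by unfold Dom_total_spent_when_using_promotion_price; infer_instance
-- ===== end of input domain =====

-- B replaces A's O(n) while loop with the O(1) closed form (n//2)*promo + (n%2)*regular.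

-- ===== PORT A =====
-- A's while loop, with (remaining yogurts, accumulated total_spent) as the loop state.
def pvLoopA (total_yogurts regular_price promotion_price total_spent : Int) : Int :=
  if total_yogurts > 0 then
    if total_yogurts ≥ 2 then
      pvLoopA (total_yogurts - 2) regular_price promotion_price (total_spent + promotion_price)
    else
      pvLoopA (total_yogurts - 1) regular_price promotion_price (total_spent + regular_price)
  else total_spent
termination_by total_yogurts.toNat
decreasing_by all_goals omega

def total_spent_when_using_promotion_price (total_yogurts : Int) (regular_price : Int) (promotion_price : Int) : Int :=
  pvLoopA total_yogurts regular_price promotion_price 0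

-- ===== PORT B =====
def total_spent_when_using_promotion_price_alt (total_yogurts : Int) (regular_price : Int) (promotion_price : Int) : Int :=
  PySem.Int.floordiv (max total_yogurts 0) 2 * promotion_price +
    PySem.Int.mod (max total_yogurts 0) 2 * regular_price

-- ===== PRECONDITION & SPEC =====
def Spec_total_spent_when_using_promotion_price (total_yogurts : Int) (regular_price : Int) (promotion_price : Int) (out : Int) : Prop := out = total_spent_when_using_promotion_price_alt total_yogurts regular_price promotion_price
instance (total_yogurts : Int) (regular_price : Int) (promotion_price : Int) (out : Int) : Decidable (Spec_total_spent_when_using_promotion_price total_yogurts regular_price promotion_price out) := by unfold Spec_total_spent_when_using_promotion_price; infer_instance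

-- ===== CLAIM (what is proved, stated in full; the proofs are below) =====
def Claim_equal_total_spent_when_using_promotion_price : Prop := ∀ (total_yogurts : Int) (regular_price : Int) (promotion_price : Int), Dom_total_spent_when_using_promotion_price total_yogurts regular_price promotion_price → Spec_total_spent_when_using_promotion_price total_yogurts regular_price promotion_price (total_spent_when_using_promotion_price total_yogurts regular_price promotion_price)

-- ===== LEMMAS AND PROOFS =====
lemma pvLoopA_closed (n r p acc : Int) :
    pvLoopA n r p acc = acc + (max n 0) / 2 * p + (max n 0) % 2 * r := by
  rw [pvLoopA]
  split_ifs with h1 h2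
  · rw [pvLoopA_closed (n - 2) r p (acc + p)]
    have e1 : max (n - 2) 0 = n - 2 := by omega
    have e2 : (n - 2) / 2 = n / 2 - 1 := by omega
    have e3 : (n - 2) % 2 = n % 2 := by omega
    have e4 : max n 0 = n := by omega
    rw [e1, e2, e3, e4]; ring
  · rw [pvLoopA_closed (n - 1) r p (acc + r)]
    have hn : n = 1 := by omega
    subst hn; norm_num
  · have e : max n 0 = 0 := by omega
    rw [e]; norm_num
termination_by n.toNat
decreasing_by all_goals omega

-- ===== VERDICT (by name: the statement is the Claim_ definition above) =====
theorem total_spent_when_using_promotion_price_spec : Claim_equal_total_spent_when_using_promotion_price := by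
  intro n r p _
  unfold Spec_total_spent_when_using_promotion_price total_spent_when_using_promotion_price
    total_spent_when_using_promotion_price_alt
  rw [pvLoopA_closed, PySem.Int.floordiv_eq_ediv_of_pos (by omega),
    PySem.Int.mod_eq_emod_of_pos (by omega)]
  ring
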